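-- pv_equiv track=rewrite | github.com/brette-0/nesbrette | profiling/math/cmult.py | biased_complexity
-- ===== SOURCE A (Python) =====
-- def biased_complexity(n : int) -> int:
--     c : int = 1
--     r : int = 0
--     while n:
--         if n & 1:
--             r += c
--         n >>= 1
--         c += 1
--     return r
-- ===== SOURCE B (Python) =====
-- def biased_complexity(n : int) -> int:
--     s = bin(n)[2:]
--     L = len(s)
--     return sum(L - i for i, ch in enumerate(s) if ch == '1')
-- ===== Notes on version B (the rewrite author's own statement) =====
-- stated objective: idiomatic
-- what changed: Replaces the manual shift-and-position-counter loop with formatting n as a binary string and summing the 1-indexed positions of its '1' digits in one comprehension.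
import Mathlib
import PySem

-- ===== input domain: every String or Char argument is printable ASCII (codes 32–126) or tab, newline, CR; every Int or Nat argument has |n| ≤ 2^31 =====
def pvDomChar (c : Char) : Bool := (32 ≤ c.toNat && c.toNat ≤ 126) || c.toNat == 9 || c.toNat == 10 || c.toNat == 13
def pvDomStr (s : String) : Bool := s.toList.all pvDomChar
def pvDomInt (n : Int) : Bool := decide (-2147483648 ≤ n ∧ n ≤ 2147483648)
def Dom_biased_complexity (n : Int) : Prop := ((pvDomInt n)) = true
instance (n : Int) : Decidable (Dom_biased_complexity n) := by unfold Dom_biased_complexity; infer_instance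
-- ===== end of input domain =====

-- B builds the binary string of n and sums the 1-indexed positions of its '1'
-- digits in one comprehension, instead of A's shift-and-count loop (objective:
-- idiomatic; no speed claim).

-- ===== PORT A =====
-- while n: if n & 1: r += c; n >>= 1; c += 1   (Python diverges for n < 0,
-- excluded by Pre_; on 0 ≤ n the loop state n is the Nat n.toNat)
def pvLoopA (n : Nat) (c r : Int) : Int :=
  if n = 0 then r
  else pvLoopA (n / 2) (c + 1) (if n % 2 = 1 then r + c else r)
decreasing_by exact Nat.div_lt_self (Nat.pos_of_ne_zero (by assumption)) (by norm_num)

def biased_complexity (n : Int) : Int := pvLoopA n.toNat 1 0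

-- ===== PORT B =====
-- bin(n)[2:] for 0 ≤ n: most-significant digit first, '0' for n = 0
def pvBinCore (n : Nat) : List Char :=
  if n = 0 then []
  else pvBinCore (n / 2) ++ [if n % 2 = 1 then '1' else '0']
decreasing_by exact Nat.div_lt_self (Nat.pos_of_ne_zero (by assumption)) (by norm_num)

def pvBinStr (n : Nat) : List Char := if n = 0 then ['0'] else pvBinCore n

-- bin(n)[2:] for n < 0 is 'b' followed by the digits of |n| (bin(-5) = '-0b101')
-- sum(L - i for i, ch in enumerate(s) if ch == '1')
def biased_complexity_alt (n : Int) : Int :=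
  let s := if n < 0 then 'b' :: pvBinCore n.natAbs else pvBinStr n.toNat
  let L : Int := s.length
  s.zipIdx.foldl (fun acc ci => if ci.1 = '1' then acc + (L - (ci.2 : Int)) else acc) 0

-- ===== PRECONDITION & SPEC =====
-- Pre_ excludes n < 0, on which Python A's while-loop never terminates (n >>= 1 stays -1).
def Pre_biased_complexity (n : Int) : Prop := 0 ≤ n
instance (n : Int) : Decidable (Pre_biased_complexity n) := by unfold Pre_biased_complexity; infer_instance
def pvWitness_biased_complexity : Int := (5)

def Spec_biased_complexity (n : Int) (out : Int) : Prop := out = biased_complexity_alt n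
instance (n : Int) (out : Int) : Decidable (Spec_biased_complexity n out) := by unfold Spec_biased_complexity; infer_instance

-- ===== CLAIM (what is proved, stated in full; the proofs are below) =====
def Claim_equal_biased_complexity : Prop := ∀ (n : Int), Dom_biased_complexity n → Pre_biased_complexity n → Spec_biased_complexity n (biased_complexity n)

-- ===== LEMMAS AND PROOFS =====

-- popcount of n
def pvPc (n : Nat) : Int :=
  if n = 0 then 0 else pvPc (n / 2) + (n % 2 : Nat)
decreasing_by exact Nat.div_lt_self (Nat.pos_of_ne_zero (by assumption)) (by norm_num)

-- sum of 1-indexed set-bit positions of n (the common spec)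
def pvS (n : Nat) : Int :=
  if n = 0 then 0 else pvS (n / 2) + pvPc (n / 2) + (n % 2 : Nat)
decreasing_by exact Nat.div_lt_self (Nat.pos_of_ne_zero (by assumption)) (by norm_num)

theorem pvPc_ne {n : Nat} (h : n ≠ 0) : pvPc n = pvPc (n / 2) + ((n % 2 : Nat) : Int) := by
  rw [pvPc]; simp [h]

theorem pvS_ne {n : Nat} (h : n ≠ 0) : pvS n = pvS (n / 2) + pvPc (n / 2) + ((n % 2 : Nat) : Int) := by
  rw [pvS]; simp [h]

theorem pvLoopA_eq (n : Nat) : ∀ c r : Int, pvLoopA n c r = r + pvS n + (c - 1) * pvPc n := by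
  induction n using Nat.strong_induction_on with
  | _ n ih =>
    intro c r
    by_cases h : n = 0
    · simp [h, pvLoopA, pvS, pvPc]
    · have hlt : n / 2 < n := Nat.div_lt_self (Nat.pos_of_ne_zero h) (by norm_num)
      rw [pvLoopA, if_neg h, ih _ hlt, pvS_ne h, pvPc_ne h]
      have h2 : n % 2 = 1 ∨ n % 2 = 0 := by omega
      rcases h2 with h2 | h2 <;> simp [h2] <;> ring

theorem pvBinCore_sum (n : Nat) : ∀ (L a : Int),
    (pvBinCore n).zipIdx.foldl
      (fun acc ci => if ci.1 = '1' then acc + (L - (ci.2 : Int)) else acc) a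
    = a + pvS n + (L - (pvBinCore n).length) * pvPc n := by
  induction n using Nat.strong_induction_on with
  | _ n ih =>
    intro L a
    by_cases h : n = 0
    · simp [h, pvBinCore, pvS, pvPc]
    · have hlt : n / 2 < n := Nat.div_lt_self (Nat.pos_of_ne_zero h) (by norm_num)
      rw [pvBinCore, if_neg h, List.zipIdx_append, List.foldl_append, ih _ hlt,
        pvS_ne h, pvPc_ne h]
      have h2 : n % 2 = 1 ∨ n % 2 = 0 := by omega
      rcases h2 with h2 | h2 <;>
        simp [h2, List.zipIdx, List.length_append] <;> ring

theorem pvAlt_eq (n : Int) (hn : 0 ≤ n) : biased_complexity_alt n = pvS n.toNat := by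
  unfold biased_complexity_alt pvBinStr
  rw [if_neg (by omega : ¬ n < 0)]
  by_cases h : n.toNat = 0
  · rw [if_pos h, h]
    simp [List.zipIdx, pvS]
  · rw [if_neg h]
    rw [pvBinCore_sum]
    rw [pvS]
    rw [if_neg h]
    ring

-- ===== VERDICT (by name: the statement is the Claim_ definition above) =====
theorem biased_complexity_spec : Claim_equal_biased_complexity := by
  intro n _ hpre
  unfold Spec_biased_complexity biased_complexity
  rw [pvLoopA_eq, pvAlt_eq n hpre]
  ring
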